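-- pv_equiv track=rewrite | github.com/dongsikchoi/Learn-Backend | 프로그래머스/lv1/92334. 신고 결과 받기/신고 결과 받기.py | solution
-- ===== SOURCE A (Python) =====
-- def solution(id_list, report, k):
--     answer = []
--     answer_dict = {id : 0 for id in id_list}
--     hash_=dict()
--     for id in id_list:
--         hash_[id] = []
--
--     for report_ in report:
--         from_, to_ = report_.split(' ')
--         hash_[to_].append(from_)
--     for report_target in hash_:
--         report_from_list = list(set(hash_[report_target]))
--         if len(report_from_list) >= k:
--             for from_ in report_from_list:
--                 answer_dict[from_] += 1
--
--     for key,value in answer_dict.items():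
--         answer.append(value)
--
--
--
--
--     return answer
-- ===== SOURCE B (Python) =====
-- def solution(id_list, report, k):
--     pairs = {tuple(r.split(' ')) for r in report}
--     reported = {id: 0 for id in id_list}
--     for p in pairs:
--         reported[p[1]] += 1
--     answer = {id: 0 for id in id_list}
--     for p in pairs:
--         if reported[p[1]] >= k:
--             answer[p[0]] += 1
--     return list(answer.values())
-- ===== Notes on version B (the rewrite author's own statement) =====
-- stated objective: alternative
-- what changed: B deduplicates the report once into a global set of (from,to) pairs and makes two flat counting passes over it (distinct-reporter count per target, then notification count per reporter), instead of A's per-target reporter lists each deduplicated and re-scanned inside a nested loop.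
import Mathlib
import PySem

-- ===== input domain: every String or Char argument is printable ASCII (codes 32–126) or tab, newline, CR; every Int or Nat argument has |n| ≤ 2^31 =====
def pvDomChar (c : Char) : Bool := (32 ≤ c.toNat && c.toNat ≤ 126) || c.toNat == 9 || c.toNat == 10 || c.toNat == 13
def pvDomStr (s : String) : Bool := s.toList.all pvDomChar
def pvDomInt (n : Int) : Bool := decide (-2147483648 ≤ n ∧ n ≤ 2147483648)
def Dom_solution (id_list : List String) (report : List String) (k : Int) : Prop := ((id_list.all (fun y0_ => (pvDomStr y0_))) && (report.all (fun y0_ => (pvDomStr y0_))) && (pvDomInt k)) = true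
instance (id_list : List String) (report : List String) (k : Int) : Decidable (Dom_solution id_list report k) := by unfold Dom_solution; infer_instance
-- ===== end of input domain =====

-- B deduplicates the report once into a global pair set and counts in two flat passes; A builds
-- per-target reporter lists and deduplicates each inside a nested loop. Equivalence of the RETURN value.

-- ===== PORT A =====
def solution (id_list : List String) (report : List String) (k : Int) : List Int :=
  let answer_dict : PySem.Dict String Int :=
    id_list.foldl (fun d id => d.insert id 0) PySem.Dict.empty
  let hash_ : PySem.Dict String (List String) :=
    id_list.foldl (fun d id => d.insert id []) PySem.Dict.empty
  let hash_ := report.foldl (fun d report_ =>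
      match (PySem.Str.split? report_ " ").getD [] with
      | [from_, to_] => d.modify to_ [] (fun l => l ++ [from_])
      | _ => d) hash_
  let answer_dict := hash_.keys.foldl (fun ad report_target =>
      let report_from_list := PySem.Set.ofList (hash_.getD report_target [])
      if k ≤ (report_from_list.length : Int) then
        report_from_list.foldl (fun ad from_ => ad.modify from_ 0 (· + 1)) ad
      else ad) answer_dict
  answer_dict.values

-- ===== PORT B =====
def solution_alt (id_list : List String) (report : List String) (k : Int) : List Int :=
  let pairs : PySem.Set (List String) :=
    PySem.Set.ofList (report.map (fun r => (PySem.Str.split? r " ").getD []))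
  let reported : PySem.Dict String Int :=
    id_list.foldl (fun d id => d.insert id 0) PySem.Dict.empty
  let reported := pairs.foldl (fun d p =>
      match PySem.List.pyGet? p 1 with
      | some to_ => d.modify to_ 0 (· + 1)
      | none => d) reported
  let answer : PySem.Dict String Int :=
    id_list.foldl (fun d id => d.insert id 0) PySem.Dict.empty
  let answer := pairs.foldl (fun d p =>
      match PySem.List.pyGet? p 1 with
      | some to_ =>
          if reported.getD to_ 0 ≥ k then
            match PySem.List.pyGet? p 0 with
            | some from_ => d.modify from_ 0 (· + 1)
            | none => d
          else d
      | none => d) answer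
  answer.values

-- ===== PRECONDITION & SPEC =====
-- helpers for stating the precondition (used nowhere in the ports)
def pvParse (r : String) : List String := (PySem.Str.split? r " ").getD []
def pvF (l : List String) : String := l.headD ""
def pvT (l : List String) : String := (l.drop 1).headD ""
-- number of DISTINCT (reporter, target) pairs aimed at target t
def pvCnt (report : List String) (t : String) : Nat :=
  (PySem.List.dedup (report.map pvParse)).countP (fun l => pvT l == t)

-- Pre_ is exactly A's return domain: every report entry splits on ' ' into exactly two parts,
-- its target is a known id, and its reporter is either a known id or its target stays below the
-- threshold k (otherwise A raises ValueError/KeyError).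
def Pre_solution (id_list : List String) (report : List String) (k : Int) : Prop :=
  ∀ r ∈ report, (pvParse r).length = 2 ∧ pvT (pvParse r) ∈ id_list ∧
    (pvF (pvParse r) ∈ id_list ∨ (pvCnt report (pvT (pvParse r)) : Int) < k)
instance (id_list : List String) (report : List String) (k : Int) : Decidable (Pre_solution id_list report k) := by unfold Pre_solution; infer_instance

def pvWitness_solution : List String × List String × Int :=
  (["muzi", "frodo", "apeach"], ["muzi frodo", "apeach frodo", "muzi apeach"], 2)

def Spec_solution (id_list : List String) (report : List String) (k : Int) (out : List Int) : Prop := out = solution_alt id_list report k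
instance (id_list : List String) (report : List String) (k : Int) (out : List Int) : Decidable (Spec_solution id_list report k out) := by unfold Spec_solution; infer_instance

-- ===== CLAIM (what is proved, stated in full; the proofs are below) =====
def Claim_equal_solution : Prop := ∀ (id_list : List String) (report : List String) (k : Int), Dom_solution id_list report k → Pre_solution id_list report k → Spec_solution id_list report k (solution id_list report k)

-- ===== LEMMAS AND PROOFS =====

-- the list of parsed report pairs, and its deduplication
def pvL (report : List String) : List (List String) := report.map pvParse
def pvDp (report : List String) : List (List String) := PySem.Set.ofList (pvL report)

theorem getD_foldl_insert_self {κ ν : Type} [BEq κ] [LawfulBEq κ] [DecidableEq κ]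
    (l : List κ) (d : PySem.Dict κ ν) (c : ν) (x : κ) (h : ∀ y, d.getD y c = c) :
    (l.foldl (fun d i => d.insert i c) d).getD x c = c := by
  induction l generalizing d with
  | nil => exact h x
  | cons a l ih =>
      refine ih (d.insert a c) ?_
      intro y; rw [PySem.Dict.getD_insert]; split_ifs <;> simp [h]

theorem set_update_of_subset {α : Type} [BEq α] [LawfulBEq α]
    (s : PySem.Set α) (xs : List α) (h : ∀ x ∈ xs, x ∈ s) :
    PySem.Set.update s xs = s := by
  induction xs generalizing s with
  | nil => exact PySem.Set.update_nil s
  | cons a xs ih =>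
      have ha : PySem.Set.add s a = s := by
        simp [PySem.Set.add, PySem.Set.contains, h a (by simp)]
      show PySem.Set.update (PySem.Set.add s a) xs = s
      rw [ha]; exact ih s (fun x hx => h x (by simp [hx]))

theorem set_ofList_filter {α : Type} [BEq α] [LawfulBEq α] (M : List α) (q : α → Bool) :
    PySem.Set.ofList (M.filter q) = (PySem.Set.ofList M).filter q := by
  induction M using List.reverseRecOn with
  | nil => rfl
  | append_singleton M x ih =>
      rw [List.filter_append, PySem.Set.ofList_append_singleton]
      by_cases hq : q x = true
      · rw [show List.filter q [x] = [x] by simp [hq], PySem.Set.ofList_append_singleton, ih]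
        simp only [PySem.Set.add, PySem.Set.contains, List.elem_iff]
        by_cases hm : x ∈ PySem.Set.ofList M
        · have h2 : x ∈ (PySem.Set.ofList M).filter q := List.mem_filter.mpr ⟨hm, hq⟩
          simp [hm, h2]
        · have h2 : x ∉ (PySem.Set.ofList M).filter q := fun hc => hm (List.mem_filter.mp hc).1
          simp [hm, h2, List.filter_append, hq]
      · rw [show List.filter q [x] = ([] : List α) by simp [hq], List.append_nil, ih]
        simp only [PySem.Set.add, PySem.Set.contains, List.elem_iff, PySem.Set.mem_ofList]
        by_cases hm : x ∈ M
        · simp [hm]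
        · simp [hm, List.filter_append, hq]

theorem set_ofList_map_inj {α β : Type} [BEq α] [LawfulBEq α] [BEq β] [LawfulBEq β]
    (M : List α) (g : α → β) (hg : ∀ a ∈ M, ∀ b ∈ M, g a = g b → a = b) :
    PySem.Set.ofList (M.map g) = (PySem.Set.ofList M).map g := by
  induction M using List.reverseRecOn with
  | nil => rfl
  | append_singleton M x ih =>
      have hg' : ∀ a ∈ M, ∀ b ∈ M, g a = g b → a = b :=
        fun a ha b hb => hg a (by simp [ha]) b (by simp [hb])
      rw [List.map_append, List.map_singleton, PySem.Set.ofList_append_singleton,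
          PySem.Set.ofList_append_singleton, ih hg']
      simp only [PySem.Set.add, PySem.Set.contains, List.elem_iff]
      by_cases hm : x ∈ PySem.Set.ofList M
      · have : g x ∈ (PySem.Set.ofList M).map g := List.mem_map.mpr ⟨x, hm, rfl⟩
        simp [hm, this]
      · have hsub : ∀ a ∈ PySem.Set.ofList M, a ∈ M := fun a ha => (PySem.Set.mem_ofList M a).mp ha
        have : g x ∉ (PySem.Set.ofList M).map g := by
          intro hc
          obtain ⟨b, hb, hgb⟩ := List.mem_map.mp hc
          have hbM : b ∈ M := hsub b hb
          have := hg b (by simp [hbM]) x (by simp) hgb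
          exact hm (this ▸ hb)
        simp [hm, this]

theorem outer_getD (K : List String) (S : String → List String) (k : Int)
    (ad : PySem.Dict String Int) (x : String) :
    (K.foldl (fun ad t =>
        if k ≤ ((S t).length : Int) then
          (S t).foldl (fun ad f => ad.modify f 0 (· + 1)) ad
        else ad) ad).getD x 0
      = ad.getD x 0 + (K.map (fun t => if k ≤ ((S t).length : Int) then ((S t).count x : Int) else 0)).sum := by
  induction K generalizing ad with
  | nil => simp
  | cons t K ih =>
      rw [List.foldl_cons]
      by_cases h : k ≤ ((S t).length : Int)
      · rw [if_pos h, ih, PySem.Dict.getD_foldl_modify_add_one]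
        simp [h]; ring
      · rw [if_neg h, ih]
        simp [h]

theorem outer_keys (K : List String) (S : String → List String) (k : Int)
    (ad : PySem.Dict String Int)
    (h : ∀ t ∈ K, k ≤ ((S t).length : Int) → ∀ f ∈ S t, f ∈ ad.keys) :
    (K.foldl (fun ad t =>
        if k ≤ ((S t).length : Int) then
          (S t).foldl (fun ad f => ad.modify f 0 (· + 1)) ad
        else ad) ad).keys = ad.keys := by
  induction K generalizing ad with
  | nil => rfl
  | cons t K ih =>
      rw [List.foldl_cons]
      by_cases hc : k ≤ ((S t).length : Int)
      · rw [if_pos hc]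
        have hkeys : ((S t).foldl (fun ad f => ad.modify f 0 (· + 1)) ad).keys = ad.keys := by
          rw [PySem.Dict.keys_foldl_modify (S t) 0 (fun _ _ => (· + 1)) ad]
          exact set_update_of_subset _ _ (h t (by simp) hc)
        rw [ih _ (fun t' ht' hc' f hf => by rw [hkeys]; exact h t' (by simp [ht']) hc' f hf), hkeys]
      · rw [if_neg hc]
        exact ih _ (fun t' ht' hc' f hf => h t' (by simp [ht']) hc' f hf)

theorem condinc_getD {α : Type} (D : List α) (cond : α → Prop) [DecidablePred cond]
    (key : α → String) (ad : PySem.Dict String Int) (x : String) :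
    (D.foldl (fun d l => if cond l then d.modify (key l) 0 (· + 1) else d) ad).getD x 0
      = ad.getD x 0 + (D.map (fun l => if cond l ∧ key l = x then (1 : Int) else 0)).sum := by
  induction D generalizing ad with
  | nil => simp
  | cons l D ih =>
      rw [List.foldl_cons]
      by_cases h : cond l
      · rw [if_pos h, ih]
        have h1 : (ad.modify (key l) 0 (· + 1)).getD x 0 = ad.getD x 0 + List.count x [key l] := by
          exact PySem.Dict.getD_foldl_modify_add_one [key l] ad x
        rw [h1]
        by_cases hx : key l = x
        · simp [h, hx]; ring
        · have : x ≠ key l := fun hc => hx hc.symm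
          simp [h, hx]
      · rw [if_neg h, ih]
        simp [h]

theorem condinc_keys {α : Type} (D : List α) (cond : α → Prop) [DecidablePred cond]
    (key : α → String) (ad : PySem.Dict String Int)
    (h : ∀ l ∈ D, cond l → key l ∈ ad.keys) :
    (D.foldl (fun d l => if cond l then d.modify (key l) 0 (· + 1) else d) ad).keys = ad.keys := by
  induction D generalizing ad with
  | nil => rfl
  | cons l D ih =>
      rw [List.foldl_cons]
      by_cases hc : cond l
      · rw [if_pos hc]
        have hkeys : (ad.modify (key l) 0 (· + 1)).keys = ad.keys := by
          have := PySem.Dict.keys_foldl_modify [key l] 0 (fun _ _ => (· + 1)) ad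
          simp only [List.foldl_cons, List.foldl_nil] at this
          rw [this]
          exact set_update_of_subset _ _ (by simpa using h l (by simp) hc)
        rw [ih _ (fun l' hl' hc' => by rw [hkeys]; exact h l' (by simp [hl']) hc'), hkeys]
      · rw [if_neg hc]
        exact ih _ (fun l' hl' hc' => h l' (by simp [hl']) hc')

theorem sum_single (K : List String) (hnd : K.Nodup) (a : String) (ha : a ∈ K)
    (C : String → Prop) [DecidablePred C] (p : Prop) [Decidable p] :
    (K.map (fun t => if C t then (if a = t ∧ p then (1 : Int) else 0) else 0)).sum
      = if C a ∧ p then 1 else 0 := by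
  induction K with
  | nil => simp at ha
  | cons b K ih =>
      rw [List.map_cons, List.sum_cons]
      rcases List.mem_cons.mp ha with h | h
      · subst h
        have hnotin : a ∉ K := (List.nodup_cons.mp hnd).1
        have hz : (K.map (fun t => if C t then (if a = t ∧ p then (1 : Int) else 0) else 0)).sum = 0 := by
          apply List.sum_eq_zero
          intro y hy
          obtain ⟨t, ht, rfl⟩ := List.mem_map.mp hy
          have : ¬(a = t ∧ p) := fun hc => hnotin (hc.1 ▸ ht)
          simp [this]
        rw [hz]
        by_cases hC : C a
        · by_cases hp : p <;> simp [hC, hp, and_comm]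
        · simp [hC]
      · have hab : a ≠ b := fun hc => (List.nodup_cons.mp hnd).1 (hc ▸ h)
        rw [ih (List.nodup_cons.mp hnd).2 h]
        simp [hab]

theorem sum_partition {α : Type} (K : List String) (hnd : K.Nodup) (D : List α)
    (pt : α → String) (hm : ∀ l ∈ D, pt l ∈ K)
    (C : String → Prop) [DecidablePred C] (P : α → Prop) [DecidablePred P] :
    (K.map (fun t => if C t then ((D.countP (fun l => pt l = t ∧ P l) : Int)) else 0)).sum
      = (D.map (fun l => if C (pt l) ∧ P l then (1 : Int) else 0)).sum := by
  induction D with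
  | nil => simp
  | cons l D ih =>
      have hl : pt l ∈ K := hm l (by simp)
      have hm' : ∀ l' ∈ D, pt l' ∈ K := fun l' h' => hm l' (by simp [h'])
      rw [List.map_cons, List.sum_cons, ← ih hm']
      have hsplit : (K.map (fun t => if C t then (((l :: D).countP (fun l' => pt l' = t ∧ P l') : Nat) : Int) else 0))
          = (K.map (fun t => (if C t then ((D.countP (fun l' => pt l' = t ∧ P l') : Nat) : Int) else 0)
              + (if C t then (if pt l = t ∧ P l then (1 : Int) else 0) else 0))) := by
        apply List.map_congr_left
        intro t _
        rw [List.countP_cons]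
        by_cases hC : C t
        · simp only [if_pos hC]
          by_cases hcond : pt l = t ∧ P l
          · simp [hcond]
          · simp [hcond]
        · simp [hC]
      rw [hsplit, PySem.List.sum_map_add_int, sum_single K hnd (pt l) hl C (P l)]
      ring


theorem pvF_pair (a b : String) : pvF [a, b] = a := rfl
theorem pvT_pair (a b : String) : pvT [a, b] = b := rfl

theorem good_of_pre {id_list report : List String} {k : Int}
    (hpre : Pre_solution id_list report k) :
    ∀ l ∈ pvL report, ∃ a b, l = [a, b] ∧ b ∈ id_list ∧
      (a ∈ id_list ∨ ((pvCnt report b : Int) < k)) := by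
  intro l hl
  obtain ⟨r, hr, rfl⟩ := List.mem_map.mp hl
  obtain ⟨h2, hT, hd⟩ := hpre r hr
  obtain ⟨a, b, hab⟩ := List.length_eq_two.mp h2
  rw [hab] at hT hd
  exact ⟨a, b, hab, by simpa [pvT_pair] using hT, by simpa [pvF_pair, pvT_pair] using hd⟩

theorem ports_agree (id_list report : List String) (k : Int)
    (hpre : Pre_solution id_list report k) :
    solution id_list report k = solution_alt id_list report k := by
  -- shared notation
  have good := good_of_pre hpre
  have goodD : ∀ l ∈ pvDp report, ∃ a b, l = [a, b] ∧ b ∈ id_list ∧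
      (a ∈ id_list ∨ ((pvCnt report b : Int) < k)) :=
    fun l hl => good l ((PySem.Set.mem_ofList _ _).mp hl)
  -- the two init dicts
  have hd0getD : ∀ y, (id_list.foldl (fun d id => d.insert id (0 : Int)) PySem.Dict.empty).getD y 0 = 0 :=
    fun y => getD_foldl_insert_self id_list PySem.Dict.empty 0 y (fun y => PySem.Dict.getD_empty y 0)
  have hd0keys : (id_list.foldl (fun d id => d.insert id (0 : Int)) PySem.Dict.empty).keys
      = PySem.Set.ofList id_list := by
    rw [PySem.Dict.keys_foldl_insert id_list (fun _ _ => (0 : Int)) PySem.Dict.empty]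
    rfl
  have hh0getD : ∀ y, (id_list.foldl (fun d id => d.insert id ([] : List String)) PySem.Dict.empty).getD y [] = [] :=
    fun y => getD_foldl_insert_self id_list PySem.Dict.empty [] y (fun y => PySem.Dict.getD_empty y [])
  have hh0keys : (id_list.foldl (fun d id => d.insert id ([] : List String)) PySem.Dict.empty).keys
      = PySem.Set.ofList id_list := by
    rw [PySem.Dict.keys_foldl_insert id_list (fun _ _ => ([] : List String)) PySem.Dict.empty]
    rfl
  -- ===== A side =====
  -- the report loop in parsed form
  have hA1 : report.foldl
        (fun d report_ =>
          match (PySem.Str.split? report_ " ").getD [] with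
          | [from_, to_] => d.modify to_ [] fun l => l ++ [from_]
          | _ => d)
        (id_list.foldl (fun d id => d.insert id ([] : List String)) PySem.Dict.empty)
      = (pvL report).foldl (fun d l => d.modify (pvT l) [] (fun s => s ++ [pvF l]))
        (id_list.foldl (fun d id => d.insert id ([] : List String)) PySem.Dict.empty) := by
    rw [pvL, List.foldl_map]
    apply PySem.List.foldl_congr_mem
    intro acc r hr
    obtain ⟨a, b, hab, _, _⟩ := good (pvParse r) (List.mem_map.mpr ⟨r, hr, rfl⟩)
    show (match (pvParse r) with
          | [from_, to_] => acc.modify to_ [] fun l => l ++ [from_]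
          | _ => acc) = _
    rw [hab]
    simp [pvF_pair, pvT_pair]
  have hAgetD : ∀ t, (report.foldl
        (fun d report_ =>
          match (PySem.Str.split? report_ " ").getD [] with
          | [from_, to_] => d.modify to_ [] fun l => l ++ [from_]
          | _ => d)
        (id_list.foldl (fun d id => d.insert id ([] : List String)) PySem.Dict.empty)).getD t []
      = ((pvL report).filter (fun l => pvT l == t)).map pvF := by
    intro t
    rw [hA1, show (pvL report).foldl (fun d l => d.modify (pvT l) [] (fun s => s ++ [pvF l]))
          (id_list.foldl (fun d id => d.insert id ([] : List String)) PySem.Dict.empty)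
        = ((pvL report).map (fun l => (pvT l, pvF l))).foldl (fun d p => d.modify p.1 [] (fun s => s ++ [p.2]))
          (id_list.foldl (fun d id => d.insert id ([] : List String)) PySem.Dict.empty) from
        (List.foldl_map (f := fun l => (pvT l, pvF l))
          (g := fun d p => d.modify p.1 [] (fun s => s ++ [p.2]))
          (l := pvL report)
          (init := id_list.foldl (fun d id => d.insert id ([] : List String)) PySem.Dict.empty)).symm,
      PySem.Dict.getD_foldl_modify_append, hh0getD t]
    rw [List.filter_map, List.map_map]
    rfl
  have hAkeys : (report.foldl
        (fun d report_ =>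
          match (PySem.Str.split? report_ " ").getD [] with
          | [from_, to_] => d.modify to_ [] fun l => l ++ [from_]
          | _ => d)
        (id_list.foldl (fun d id => d.insert id ([] : List String)) PySem.Dict.empty)).keys
      = PySem.Set.ofList id_list := by
    rw [hA1, PySem.Dict.keys_foldl_modify_key (pvL report) pvT []
          (fun _ l => (fun s => s ++ [pvF l])) _, hh0keys]
    apply set_update_of_subset
    intro t ht
    obtain ⟨l, hl, rfl⟩ := List.mem_map.mp ht
    obtain ⟨a, b, hab, hb, _⟩ := good l hl
    rw [hab, pvT_pair]
    exact (PySem.Set.mem_ofList _ _).mpr hb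
  -- dedup/filter/map bridges for A's per-target reporter sets
  have hinj : ∀ t : String, ∀ a ∈ (pvL report).filter (fun l => pvT l == t),
      ∀ b ∈ (pvL report).filter (fun l => pvT l == t), pvF a = pvF b → a = b := by
    intro t a ha b hb hf
    obtain ⟨xa, ya, haa, _, _⟩ := good a (List.mem_filter.mp ha).1
    obtain ⟨xb, yb, hbb, _, _⟩ := good b (List.mem_filter.mp hb).1
    have hta : pvT a = t := by simpa using (List.mem_filter.mp ha).2
    have htb : pvT b = t := by simpa using (List.mem_filter.mp hb).2
    rw [haa, pvT_pair] at hta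
    rw [hbb, pvT_pair] at htb
    rw [haa, hbb] at hf ⊢
    rw [pvF_pair, pvF_pair] at hf
    rw [hf, hta, htb]
  have hSt : ∀ t, PySem.Set.ofList (((pvL report).filter (fun l => pvT l == t)).map pvF)
      = ((pvDp report).filter (fun l => pvT l == t)).map pvF := by
    intro t
    rw [set_ofList_map_inj _ _ (hinj t), set_ofList_filter]
    rfl
  have hStlen : ∀ t, ((PySem.Set.ofList (((pvL report).filter (fun l => pvT l == t)).map pvF)).length : Int)
      = ((pvDp report).countP (fun l => pvT l == t) : Int) := by
    intro t
    rw [hSt t]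
    simp [List.countP_eq_length_filter]
  have hStcount : ∀ t x, ((PySem.Set.ofList (((pvL report).filter (fun l => pvT l == t)).map pvF)).count x : Int)
      = ((pvDp report).countP (fun l => pvF l == x && (pvT l == t)) : Int) := by
    intro t x
    rw [hSt t, List.count_eq_countP, List.countP_map, List.countP_filter]
    rfl
  -- the threshold never fires on a reporter outside id_list
  have hrep_in : ∀ l ∈ pvDp report,
      k ≤ ((pvDp report).countP (fun l' => pvT l' == pvT l) : Int) → pvF l ∈ PySem.Set.ofList id_list := by
    intro l hl hk
    obtain ⟨a, b, hab, hb, hdisj⟩ := goodD l hl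
    rcases hdisj with ha | hcnt
    · rw [hab, pvF_pair]
      exact (PySem.Set.mem_ofList _ _).mpr ha
    · exfalso
      have : pvCnt report b = (pvDp report).countP (fun l' => pvT l' == b) := by
        simp [pvCnt, pvDp, pvL]
      rw [this, ← show pvT l = b by rw [hab, pvT_pair]] at hcnt
      omega
  -- ===== A's value =====
  have hAval : solution id_list report k
      = (PySem.Set.ofList id_list).map (fun x =>
          ((PySem.Set.ofList id_list).map (fun t =>
            if k ≤ ((pvDp report).countP (fun l => pvT l == t) : Int)
            then ((pvDp report).countP (fun l => pvF l == x && (pvT l == t)) : Int) else 0)).sum) := by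
    simp only [solution]
    generalize hH : report.foldl
        (fun d report_ =>
          match (PySem.Str.split? report_ " ").getD [] with
          | [from_, to_] => d.modify to_ [] fun l => l ++ [from_]
          | _ => d)
        (id_list.foldl (fun d id => d.insert id ([] : List String)) PySem.Dict.empty) = H
    have hgetD : ∀ t, H.getD t [] = ((pvL report).filter (fun l => pvT l == t)).map pvF := by
      rw [← hH]; exact hAgetD
    have hkeys : H.keys = PySem.Set.ofList id_list := by rw [← hH]; exact hAkeys
    simp only [hgetD, hkeys]
    have hGkeys := outer_keys (PySem.Set.ofList id_list)
        (fun t => PySem.Set.ofList (((pvL report).filter (fun l => pvT l == t)).map pvF)) k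
        (id_list.foldl (fun d id => d.insert id (0 : Int)) PySem.Dict.empty)
        (by
          intro t ht hk f hf
          rw [hd0keys]
          obtain ⟨l, hl, rfl⟩ := List.mem_map.mp ((PySem.Set.mem_ofList _ _).mp hf)
          have hlL : l ∈ pvL report := (List.mem_filter.mp hl).1
          have hlD : l ∈ pvDp report := (PySem.Set.mem_ofList _ _).mpr hlL
          have htl : pvT l = t := by simpa using (List.mem_filter.mp hl).2
          apply hrep_in l hlD
          rw [htl, ← hStlen t]
          exact hk)
    have hGget := fun x => outer_getD (PySem.Set.ofList id_list)
        (fun t => PySem.Set.ofList (((pvL report).filter (fun l => pvT l == t)).map pvF)) k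
        (id_list.foldl (fun d id => d.insert id (0 : Int)) PySem.Dict.empty) x
    rw [PySem.Dict.values_eq_map_keys _ (by rw [hGkeys, hd0keys]; exact PySem.Set.nodup_ofList id_list) 0,
        hGkeys, hd0keys]
    apply List.map_congr_left
    intro x hx
    rw [hGget x, hd0getD x, zero_add]
    apply congrArg List.sum
    apply List.map_congr_left
    intro t ht
    rw [← hStlen t, ← hStcount t x]
  -- ===== B's value =====
  have hBval : solution_alt id_list report k
      = (PySem.Set.ofList id_list).map (fun x =>
          ((pvDp report).map (fun l =>
            if (k ≤ ((pvDp report).countP (fun l' => pvT l' == pvT l) : Int)) ∧ pvF l = x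
            then (1 : Int) else 0)).sum) := by
    simp only [solution_alt]
    rw [show PySem.Set.ofList (report.map (fun r => (PySem.Str.split? r " ").getD [])) = pvDp report from rfl]
    generalize hR : (pvDp report).foldl
        (fun d p => match PySem.List.pyGet? p 1 with
          | some to_ => d.modify to_ (0 : Int) fun x => x + 1
          | none => d)
        (id_list.foldl (fun d id => d.insert id (0 : Int)) PySem.Dict.empty) = R
    have hRget : ∀ t, R.getD t 0 = ((pvDp report).countP (fun l => pvT l == t) : Int) := by
      intro t
      rw [← hR]
      have h1 : (pvDp report).foldl
          (fun d p => match PySem.List.pyGet? p 1 with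
            | some to_ => d.modify to_ (0 : Int) fun x => x + 1
            | none => d) (id_list.foldl (fun d id => d.insert id (0 : Int)) PySem.Dict.empty)
          = (pvDp report).foldl (fun d l => d.modify (pvT l) (0 : Int) (· + 1)) (id_list.foldl (fun d id => d.insert id (0 : Int)) PySem.Dict.empty) := by
        apply PySem.List.foldl_congr_mem
        intro acc l hl
        obtain ⟨a, b, hab, _, _⟩ := goodD l hl
        rw [hab, show PySem.List.pyGet? [a, b] 1 = some b from rfl]
        show acc.modify b (0 : Int) (· + 1) = acc.modify (pvT [a, b]) (0 : Int) (· + 1)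
        rw [pvT_pair]
      rw [h1, show (pvDp report).foldl (fun d l => d.modify (pvT l) (0 : Int) (· + 1)) (id_list.foldl (fun d id => d.insert id (0 : Int)) PySem.Dict.empty)
            = ((pvDp report).map pvT).foldl (fun d x => d.modify x (0 : Int) (· + 1)) (id_list.foldl (fun d id => d.insert id (0 : Int)) PySem.Dict.empty) from
          (List.foldl_map (f := pvT) (g := fun d x => d.modify x (0 : Int) (· + 1))
            (l := pvDp report) (init := (id_list.foldl (fun d id => d.insert id (0 : Int)) PySem.Dict.empty))).symm,
        PySem.Dict.getD_foldl_modify_add_one, hd0getD, zero_add, List.count_eq_countP, List.countP_map]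
      rfl
    have hB2 : (pvDp report).foldl
        (fun d p => match PySem.List.pyGet? p 1 with
          | some to_ =>
              if R.getD to_ 0 ≥ k then
                match PySem.List.pyGet? p 0 with
                | some from_ => d.modify from_ (0 : Int) fun x => x + 1
                | none => d
              else d
          | none => d) (id_list.foldl (fun d id => d.insert id (0 : Int)) PySem.Dict.empty)
      = (pvDp report).foldl
        (fun d l => if (k ≤ ((pvDp report).countP (fun l' => pvT l' == pvT l) : Int))
            then d.modify (pvF l) (0 : Int) (· + 1) else d) (id_list.foldl (fun d id => d.insert id (0 : Int)) PySem.Dict.empty) := by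
      apply PySem.List.foldl_congr_mem
      intro acc l hl
      obtain ⟨a, b, hab, _, _⟩ := goodD l hl
      rw [hab]
      show (match PySem.List.pyGet? [a, b] 1 with
            | some to_ =>
                if R.getD to_ 0 ≥ k then
                  match PySem.List.pyGet? [a, b] 0 with
                  | some from_ => acc.modify from_ (0 : Int) fun x => x + 1
                  | none => acc
                else acc
            | none => acc) = _
      rw [show PySem.List.pyGet? [a, b] 1 = some b from rfl,
          show PySem.List.pyGet? [a, b] 0 = some a from rfl]
      show (if R.getD b 0 ≥ k then acc.modify a (0 : Int) (· + 1) else acc) = _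
      rw [hRget b]
      simp [pvT_pair, pvF_pair, ge_iff_le]
    rw [hB2]
    have hkeysB := condinc_keys (pvDp report)
        (fun l => k ≤ ((pvDp report).countP (fun l' => pvT l' == pvT l) : Int)) pvF
        (id_list.foldl (fun d id => d.insert id (0 : Int)) PySem.Dict.empty)
        (by intro l hl hc; rw [hd0keys]; exact hrep_in l hl hc)
    have hgetB := fun x => condinc_getD (pvDp report)
        (fun l => k ≤ ((pvDp report).countP (fun l' => pvT l' == pvT l) : Int)) pvF
        (id_list.foldl (fun d id => d.insert id (0 : Int)) PySem.Dict.empty) x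
    rw [PySem.Dict.values_eq_map_keys _ (by rw [hkeysB, hd0keys]; exact PySem.Set.nodup_ofList id_list) 0,
        hkeysB, hd0keys]
    apply List.map_congr_left
    intro x hx
    rw [hgetB x, hd0getD x, zero_add]
  -- ===== assemble =====
  rw [hAval, hBval]
  apply List.map_congr_left
  intro x hx
  have hmem : ∀ l ∈ pvDp report, pvT l ∈ PySem.Set.ofList id_list := by
    intro l hl
    obtain ⟨a, b, hab, hb, _⟩ := goodD l hl
    rw [hab, pvT_pair]
    exact (PySem.Set.mem_ofList _ _).mpr hb
  have hP := sum_partition (PySem.Set.ofList id_list) (PySem.Set.nodup_ofList id_list)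
      (pvDp report) pvT hmem
      (fun t => k ≤ ((pvDp report).countP (fun l => pvT l == t) : Int)) (fun l => pvF l = x)
  rw [← hP]
  apply congrArg List.sum
  apply List.map_congr_left
  intro t ht
  by_cases hC : k ≤ ((pvDp report).countP (fun l => pvT l == t) : Int)
  · rw [if_pos hC, if_pos hC]
    norm_cast
    apply List.countP_congr
    intro l _
    by_cases h1 : pvT l = t <;> by_cases h2 : pvF l = x <;> simp [h1, h2]
  · rw [if_neg hC, if_neg hC]
-- ===== VERDICT (by name: the statement is the Claim_ definition above) =====
theorem solution_spec : Claim_equal_solution := by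
  intro id_list report k _ hpre
  exact ports_agree id_list report k hpre
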